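-- pv_equiv track=rewrite | github.com/pig-games/MFORTH | tools/tass_to_asm485/convert_mforth_to_asm485.py | split_backslash_segments
-- ===== SOURCE A (Python) =====
-- def is_escaped(text: str, idx: int) -> bool:
--     backslashes = 0
--     j = idx - 1
--     while j >= 0 and text[j] == "\\":
--         backslashes += 1
--         j -= 1
--     return (backslashes % 2) == 1
--
-- def split_backslash_segments(text: str) -> list[str]:
--     segments = []
--     current = []
--     in_double = False
--     in_single = False
--     for i, ch in enumerate(text):
--         if ch == '"' and not in_single and not is_escaped(text, i):
--             in_double = not in_double
--         elif ch == "'" and not in_double and not is_escaped(text, i):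
--             in_single = not in_single
--         if ch == "\\" and not in_double and not in_single:
--             segments.append("".join(current))
--             current = []
--             continue
--         current.append(ch)
--     segments.append("".join(current))
--     return segments
-- ===== SOURCE B (Python) =====
-- def split_backslash_segments(text: str) -> list[str]:
--     segments = []
--     cur = []
--     in_double = False
--     in_single = False
--     esc = False  # parity of the run of consecutive backslashes just before this char
--     for ch in text:
--         if ch == '"' and not in_single and not esc:
--             in_double = not in_double
--         elif ch == "'" and not in_double and not esc:
--             in_single = not in_single
--         if ch == "\\":
--             esc = not esc
--             if not in_double and not in_single:
--                 segments.append("".join(cur))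
--                 cur = []
--             else:
--                 cur.append(ch)
--         else:
--             esc = False
--             cur.append(ch)
--     segments.append("".join(cur))
--     return segments
-- ===== Notes on version B (the rewrite author's own statement) =====
-- stated objective: alternative
-- what changed: B drops the per-quote backward scan over the preceding backslash run (is_escaped) and instead makes a single forward pass that carries the escape parity of the current backslash run as one extra boolean of state.
import Mathlib
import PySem

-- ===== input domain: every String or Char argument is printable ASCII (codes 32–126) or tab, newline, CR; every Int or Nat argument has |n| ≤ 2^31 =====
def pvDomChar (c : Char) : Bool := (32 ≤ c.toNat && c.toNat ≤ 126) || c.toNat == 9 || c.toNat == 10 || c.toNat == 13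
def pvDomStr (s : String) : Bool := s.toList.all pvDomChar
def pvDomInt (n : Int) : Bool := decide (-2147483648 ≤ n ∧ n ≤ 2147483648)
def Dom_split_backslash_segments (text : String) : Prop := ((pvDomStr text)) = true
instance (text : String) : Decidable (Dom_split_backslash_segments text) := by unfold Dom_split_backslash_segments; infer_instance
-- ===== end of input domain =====

-- B replaces A's backward is_escaped scan by one forward pass carrying the escape parity; same results, no speed claim.

-- ===== PORT A =====
-- while loop of is_escaped: j walks backwards over backslashes, counting them
def pvIsEscLoop (cs : List Char) (backslashes : Nat) (j : Int) : Nat :=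
  if h : 0 ≤ j ∧ PySem.List.pyGet? cs j = some '\\' then
    pvIsEscLoop cs (backslashes + 1) (j - 1)
  else backslashes
termination_by (j + 1).toNat
decreasing_by omega

def pvIsEscaped (cs : List Char) (idx : Int) : Bool :=
  pvIsEscLoop cs 0 (idx - 1) % 2 == 1

-- one iteration of A's for-loop body; state = (segments, current, in_double, in_single)
def pvStepA (cs : List Char) (st : List String × List Char × Bool × Bool) (p : Int × Char)
    : List String × List Char × Bool × Bool :=
  let segments := st.1; let current := st.2.1; let in_double := st.2.2.1; let in_single := st.2.2.2
  let i := p.1; let ch := p.2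
  let qs : Bool × Bool :=
    if ch = '"' ∧ in_single = false ∧ pvIsEscaped cs i = false then (!in_double, in_single)
    else if ch = '\'' ∧ in_double = false ∧ pvIsEscaped cs i = false then (in_double, !in_single)
    else (in_double, in_single)
  if ch = '\\' ∧ qs.1 = false ∧ qs.2 = false then (segments ++ [String.ofList current], [], qs.1, qs.2)
  else (segments, current ++ [ch], qs.1, qs.2)

def split_backslash_segments (text : String) : List String :=
  let cs := text.toList
  let st := (PySem.List.enumerate cs).foldl (pvStepA cs) ([], [], false, false)
  st.1 ++ [String.ofList st.2.1]

-- ===== PORT B =====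
-- one iteration of B's for-loop body; state = (segments, cur, in_double, in_single, esc)
def pvStepB (st : List String × List Char × Bool × Bool × Bool) (ch : Char)
    : List String × List Char × Bool × Bool × Bool :=
  let segments := st.1; let cur := st.2.1; let in_double := st.2.2.1
  let in_single := st.2.2.2.1; let esc := st.2.2.2.2
  let qs : Bool × Bool :=
    if ch = '"' ∧ in_single = false ∧ esc = false then (!in_double, in_single)
    else if ch = '\'' ∧ in_double = false ∧ esc = false then (in_double, !in_single)
    else (in_double, in_single)
  if ch = '\\' then
    if qs.1 = false ∧ qs.2 = false then (segments ++ [String.ofList cur], [], qs.1, qs.2, !esc)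
    else (segments, cur ++ [ch], qs.1, qs.2, !esc)
  else (segments, cur ++ [ch], qs.1, qs.2, false)

def split_backslash_segments_alt (text : String) : List String :=
  let st := text.toList.foldl pvStepB ([], [], false, false, false)
  st.1 ++ [String.ofList st.2.1]

-- ===== PRECONDITION & SPEC =====
def Spec_split_backslash_segments (text : String) (out : List String) : Prop := out = split_backslash_segments_alt text
instance (text : String) (out : List String) : Decidable (Spec_split_backslash_segments text out) := by unfold Spec_split_backslash_segments; infer_instance

-- ===== CLAIM (what is proved, stated in full; the proofs are below) =====
def Claim_equal_split_backslash_segments : Prop := ∀ (text : String), Dom_split_backslash_segments text → Spec_split_backslash_segments text (split_backslash_segments text)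

-- ===== LEMMAS AND PROOFS =====

lemma pvIsEscLoop_acc (cs : List Char) (b : Nat) (j : Int) :
    pvIsEscLoop cs b j = b + pvIsEscLoop cs 0 j := by
  by_cases h : 0 ≤ j ∧ PySem.List.pyGet? cs j = some '\\'
  · rw [pvIsEscLoop, dif_pos h]
    conv_rhs => rw [pvIsEscLoop, dif_pos h]
    rw [pvIsEscLoop_acc cs (b + 1) (j - 1), pvIsEscLoop_acc cs (0 + 1) (j - 1)]
    omega
  · rw [pvIsEscLoop, dif_neg h]
    conv_rhs => rw [pvIsEscLoop, dif_neg h]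
    omega
termination_by (j + 1).toNat
decreasing_by all_goals omega

lemma pvEsc_zero (cs : List Char) : pvIsEscaped cs 0 = false := by
  rw [pvIsEscaped, pvIsEscLoop, dif_neg (by norm_num)]
  rfl

lemma pvEsc_succ (cs : List Char) (i : Nat) (ch : Char) (hch : cs[i]? = some ch) :
    pvIsEscaped cs ((i : Int) + 1) = (if ch = '\\' then !(pvIsEscaped cs (i : Int)) else false) := by
  have hget : PySem.List.pyGet? cs (i : Int) = some ch := by
    rw [PySem.List.pyGet?_natCast]
    exact hch
  unfold pvIsEscaped
  have h1 : ((i : Int) + 1) - 1 = (i : Int) := by omega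
  rw [h1]
  by_cases hbs : ch = '\\'
  · rw [pvIsEscLoop, dif_pos ⟨by omega, by rw [hget, hbs]⟩, pvIsEscLoop_acc cs (0 + 1) ((i : Int) - 1)]
    simp only [hbs]
    rcases Nat.mod_two_eq_zero_or_one (pvIsEscLoop cs 0 ((i : Int) - 1)) with h | h <;>
      simp [Nat.add_mod, h]
  · rw [pvIsEscLoop, dif_neg (by simp [hget, hbs]), if_neg hbs]
    rfl

lemma pvMain (cs : List Char) (rest : List Char) :
    ∀ (i : Nat) (segs : List String) (cur : List Char) (d s : Bool),
    cs.drop i = rest →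
    ((PySem.List.enumerate rest (i : Int)).foldl (pvStepA cs) (segs, cur, d, s))
      = (fun st => (st.1, st.2.1, st.2.2.1, st.2.2.2.1))
          (rest.foldl pvStepB (segs, cur, d, s, pvIsEscaped cs (i : Int))) := by
  induction rest with
  | nil => intro i segs cur d s _; simp [PySem.List.enumerate]
  | cons ch rest ih =>
    intro i segs cur d s hdrop
    have hch : cs[i]? = some ch := by
      rw [← List.head?_drop, hdrop]; rfl
    have hdrop' : cs.drop (i + 1) = rest := by
      rw [← List.tail_drop, hdrop]; rfl
    have hesc' : pvIsEscaped cs ((i : Int) + 1)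
        = (if ch = '\\' then !(pvIsEscaped cs (i : Int)) else false) :=
      pvEsc_succ cs i ch hch
    have hstep : pvStepB (segs, cur, d, s, pvIsEscaped cs (i : Int)) ch
        = ((pvStepA cs (segs, cur, d, s) ((i : Int), ch)).1,
           (pvStepA cs (segs, cur, d, s) ((i : Int), ch)).2.1,
           (pvStepA cs (segs, cur, d, s) ((i : Int), ch)).2.2.1,
           (pvStepA cs (segs, cur, d, s) ((i : Int), ch)).2.2.2,
           pvIsEscaped cs ((i : Int) + 1)) := by
      simp only [pvStepA, pvStepB, hesc']
      by_cases hbs : ch = '\\' <;> split_ifs <;> simp_all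
    simp only [PySem.List.enumerate, List.foldl_cons, hstep]
    have h2 := ih (i + 1)
      (pvStepA cs (segs, cur, d, s) ((i : Int), ch)).1
      (pvStepA cs (segs, cur, d, s) ((i : Int), ch)).2.1
      (pvStepA cs (segs, cur, d, s) ((i : Int), ch)).2.2.1
      (pvStepA cs (segs, cur, d, s) ((i : Int), ch)).2.2.2 hdrop'
    push_cast at h2
    exact h2

-- ===== VERDICT (by name: the statement is the Claim_ definition above) =====
theorem split_backslash_segments_spec : Claim_equal_split_backslash_segments := by
  intro text _
  unfold Spec_split_backslash_segments split_backslash_segments split_backslash_segments_alt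
  have h := pvMain text.toList text.toList 0 [] [] false false (by simp)
  simp only [Nat.cast_zero, pvEsc_zero] at h
  simp only [] at h ⊢
  rw [h]
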